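-- pv_equiv track=rewrite | github.com/gromdimon/Bioinformatics_Stronghold | 54. Sorting by Reversals.py | find_min_reverse
-- ===== SOURCE A (Python) =====
-- def make_reverse(sequence, start_index, end_index):
--     prefix = sequence[:start_index]
--     reversed_subsequence = sequence[start_index:end_index][::-1]
--     suffix = sequence[end_index:]
--     return prefix + reversed_subsequence + suffix
--
-- def find_breakpoints(sequence, target_sequence):
--     breakpoints = []
--     for index in range(len(sequence) - 1):
--         current_element = sequence[index]
--         adjacent_element = sequence[index + 1]
--         if abs(target_sequence.index(current_element) - target_sequence.index(adjacent_element)) != 1: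
--             # If two symbols do not follow each other
--             breakpoints.append(index + 1)
--     return breakpoints
--
-- def find_min_reverse(sequences, target_sequence):
--     # Take sequences from previous step and perform function
--     reversals = []
--     for sequence in sequences:
--         breakpoints = find_breakpoints(sequence[0], target_sequence)
--         for start_index_i in range(len(breakpoints) - 1):
--             for end_index_i in range(start_index_i + 1, len(breakpoints)):
--                 reversals.append((make_reverse(sequence[0], breakpoints[start_index_i], breakpoints[end_index_i]),
--                                   sequence[1] + [(breakpoints[start_index_i] - 1, breakpoints[end_index_i] - 1)]))
--     min_bp = len(target_sequence)
--     minimum_reversals = []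
--     for reversal in reversals:  # Choosing reversals with minimum breakpoints
--         num_breakpoints = len(find_breakpoints(reversal[0], target_sequence))
--         if num_breakpoints < min_bp:
--             min_bp = num_breakpoints
--             minimum_reversals = [reversal]
--         elif num_breakpoints == min_bp:
--             minimum_reversals.append(reversal)
--     return minimum_reversals
-- ===== SOURCE B (Python) =====
-- def make_reverse(sequence, start_index, end_index):
--     prefix = sequence[:start_index]
--     reversed_subsequence = sequence[start_index:end_index][::-1]
--     suffix = sequence[end_index:]
--     return prefix + reversed_subsequence + suffix
--
-- def find_min_reverse(sequences, target_sequence):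
--     # Position of each symbol in the target, indexed once (first occurrence).
--     pos = {}
--     for k, x in enumerate(target_sequence):
--         if x not in pos:
--             pos[x] = k
--
--     def is_bp(u, v):
--         # 1 if a breakpoint sits between adjacent symbols u, v, else 0.
--         return 1 if abs(pos[u] - pos[v]) != 1 else 0
--
--     # Reversing seq[i:j] with i, j both breakpoint positions only changes the two
--     # boundary adjacencies: internal pairs keep their (symmetric) breakpoint status.
--     # So each candidate's breakpoint count is len(bps) - 2 + the two new boundary
--     # checks -- no rescan of the reversed sequence is needed.
--     scored = []
--     for seq, history in sequences:
--         bps = [k + 1 for k in range(len(seq) - 1) if is_bp(seq[k], seq[k + 1])]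
--         base = len(bps) - 2
--         for si, i in enumerate(bps):
--             for j in bps[si + 1:]:
--                 cnt = base + is_bp(seq[i - 1], seq[j - 1]) + is_bp(seq[i], seq[j])
--                 scored.append(((make_reverse(seq, i, j), history + [(i - 1, j - 1)]), cnt))
--
--     best = min([len(target_sequence)] + [c for _, c in scored])
--     return [cand for cand, c in scored if c == best]
-- ===== Notes on version B (the rewrite author's own statement) =====
-- stated objective: faster
-- what changed: B never rescans a candidate reversal: since reversing a block between two breakpoints leaves all internal adjacencies intact (the breakpoint test is symmetric), B computes each candidate's breakpoint count in O(1) as len(bps)-2 plus two boundary checks on the original sequence, using a position dictionary built once from the target, then filters the scored list by its minimum; A instead re-runs find_breakpoints (with repeated target.index scans) on every reversed candidate.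
import Mathlib
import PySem

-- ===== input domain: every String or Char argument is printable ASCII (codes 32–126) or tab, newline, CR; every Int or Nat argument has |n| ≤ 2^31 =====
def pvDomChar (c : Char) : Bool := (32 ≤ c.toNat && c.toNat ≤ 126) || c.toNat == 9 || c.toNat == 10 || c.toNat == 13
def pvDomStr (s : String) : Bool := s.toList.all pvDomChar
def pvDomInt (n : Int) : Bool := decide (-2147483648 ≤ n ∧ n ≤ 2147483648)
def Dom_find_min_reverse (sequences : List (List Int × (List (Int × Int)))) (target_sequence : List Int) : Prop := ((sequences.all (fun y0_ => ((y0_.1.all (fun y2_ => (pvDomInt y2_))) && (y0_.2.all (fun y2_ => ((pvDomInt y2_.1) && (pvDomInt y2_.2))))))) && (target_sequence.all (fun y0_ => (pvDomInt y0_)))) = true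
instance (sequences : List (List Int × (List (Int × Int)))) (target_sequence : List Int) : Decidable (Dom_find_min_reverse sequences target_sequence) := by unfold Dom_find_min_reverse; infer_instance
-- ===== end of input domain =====

-- B scores every candidate reversal in O(1) from the original sequence (reversing a block
-- between two breakpoints only changes the two boundary adjacencies), instead of rescanning
-- each reversed sequence with repeated target.index calls as A does (objective: faster).

-- ===== PORT A =====
-- sequence[:a] ++ sequence[a:b][::-1] ++ sequence[b:]
def make_reverse (sequence : List Int) (start_index end_index : Int) : List Int :=
  let pre := PySem.List.slice sequence none (some start_index)
  let reversed_subsequence :=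
    (PySem.List.slice? (PySem.List.slice sequence (some start_index) (some end_index)) none none (-1)).getD []
  let suffix := PySem.List.slice sequence (some end_index) none
  pre ++ reversed_subsequence ++ suffix

-- target_sequence.index(v); Python raises ValueError when v is absent — such inputs are excluded by Pre_
def idxD (t : List Int) (v : Int) : Int := ((PySem.List.index? t v).getD 0 : Nat)

def find_breakpoints (sequence target_sequence : List Int) : List Int :=
  (PySem.List.pyRange 0 ((sequence.length : Int) - 1) 1).foldl
    (fun breakpoints index =>
      if (idxD target_sequence (PySem.List.pyGetD sequence index 0) -
          idxD target_sequence (PySem.List.pyGetD sequence (index + 1) 0)).natAbs ≠ 1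
      then breakpoints ++ [index + 1] else breakpoints) []

def find_min_reverse (sequences : List (List Int × (List (Int × Int)))) (target_sequence : List Int) : List (List Int × (List (Int × Int))) :=
  let reversals := sequences.foldl (fun reversals sequence =>
    let breakpoints := find_breakpoints sequence.1 target_sequence
    (PySem.List.pyRange 0 ((breakpoints.length : Int) - 1) 1).foldl (fun revs start_index_i =>
      (PySem.List.pyRange (start_index_i + 1) (breakpoints.length : Int) 1).foldl (fun revs end_index_i =>
        revs ++ [(make_reverse sequence.1 (PySem.List.pyGetD breakpoints start_index_i 0) (PySem.List.pyGetD breakpoints end_index_i 0),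
                  sequence.2 ++ [(PySem.List.pyGetD breakpoints start_index_i 0 - 1,
                                  PySem.List.pyGetD breakpoints end_index_i 0 - 1)])]) revs) reversals) []
  let final := reversals.foldl (fun st reversal =>
    let num := ((find_breakpoints reversal.1 target_sequence).length : Int)
    if num < st.1 then (num, [reversal])
    else if num = st.1 then (st.1, st.2 ++ [reversal])
    else st) ((target_sequence.length : Int), ([] : List (List Int × (List (Int × Int)))))
  final.2

-- ===== PORT B =====
-- pos = {}; for k, x in enumerate(target): first-occurrence insert
def buildPos (target_sequence : List Int) : PySem.Dict Int Int :=
  (PySem.List.enumerate target_sequence).foldl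
    (fun pos p => if pos.contains p.2 then pos else pos.insert p.2 p.1) PySem.Dict.empty

-- is_bp(u, v): 1 if a breakpoint sits between adjacent symbols u, v, else 0
def isBp (pos : PySem.Dict Int Int) (u v : Int) : Int :=
  if (pos.getD u 0 - pos.getD v 0).natAbs ≠ 1 then 1 else 0

def find_min_reverse_alt (sequences : List (List Int × (List (Int × Int)))) (target_sequence : List Int) : List (List Int × (List (Int × Int))) :=
  let pos := buildPos target_sequence
  let scored := sequences.foldl (fun scored sequence =>
    -- bps = [k + 1 for k in range(len(seq) - 1) if is_bp(seq[k], seq[k + 1])]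
    let bps := ((PySem.List.pyRange 0 ((sequence.1.length : Int) - 1) 1).filter
        (fun k => decide (isBp pos (PySem.List.pyGetD sequence.1 k 0) (PySem.List.pyGetD sequence.1 (k + 1) 0) = 1))).map (fun k => k + 1)
    let base := (bps.length : Int) - 2
    -- for si, i in enumerate(bps): for j in bps[si + 1:]: O(1) incremental count
    (PySem.List.enumerate bps).foldl (fun scored p =>
      (PySem.List.slice bps (some (p.1 + 1)) none).foldl (fun scored j =>
        scored ++ [((make_reverse sequence.1 p.2 j, sequence.2 ++ [(p.2 - 1, j - 1)]),
                    base + isBp pos (PySem.List.pyGetD sequence.1 (p.2 - 1) 0) (PySem.List.pyGetD sequence.1 (j - 1) 0)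
                         + isBp pos (PySem.List.pyGetD sequence.1 p.2 0) (PySem.List.pyGetD sequence.1 j 0))]) scored) scored) []
  let best := (PySem.List.min? ([(target_sequence.length : Int)] ++ scored.map (fun p => p.2)) (fun x => x)).getD 0
  (scored.filter (fun p => decide (p.2 = best))).map (fun p => p.1)

-- ===== PRECONDITION & SPEC =====
-- Pre_ excludes exactly the inputs on which Python A raises ValueError: a listed sequence of
-- length ≥ 2 (so target.index is actually called) containing an element absent from the target.
def Pre_find_min_reverse (sequences : List (List Int × (List (Int × Int)))) (target_sequence : List Int) : Prop :=
  ∀ p ∈ sequences, 2 ≤ p.1.length → ∀ x ∈ p.1, x ∈ target_sequence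
instance (sequences : List (List Int × (List (Int × Int)))) (target_sequence : List Int) : Decidable (Pre_find_min_reverse sequences target_sequence) := by unfold Pre_find_min_reverse; infer_instance

def pvWitness_find_min_reverse : (List (List Int × (List (Int × Int)))) × List Int :=
  ([([2, 1, 3], [(0, 1)]), ([1, 3, 2], [])], [1, 2, 3])

def Spec_find_min_reverse (sequences : List (List Int × (List (Int × Int)))) (target_sequence : List Int) (out : List (List Int × (List (Int × Int)))) : Prop := out = find_min_reverse_alt sequences target_sequence
instance (sequences : List (List Int × (List (Int × Int)))) (target_sequence : List Int) (out : List (List Int × (List (Int × Int)))) : Decidable (Spec_find_min_reverse sequences target_sequence out) := by unfold Spec_find_min_reverse; infer_instance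

-- ===== CLAIM (what is proved, stated in full; the proofs are below) =====
def Claim_equal_find_min_reverse : Prop := ∀ (sequences : List (List Int × (List (Int × Int)))) (target_sequence : List Int), Dom_find_min_reverse sequences target_sequence → Pre_find_min_reverse sequences target_sequence → Spec_find_min_reverse sequences target_sequence (find_min_reverse sequences target_sequence)

-- ===== LEMMAS AND PROOFS =====

-- The first-occurrence dictionary agrees with Python's list.index.
lemma buildPos_go (t : List Int) (s : Int) (d : PySem.Dict Int Int) (x : Int) :
    (((PySem.List.enumerate t s).foldl
        (fun pos p => if pos.contains p.2 then pos else pos.insert p.2 p.1) d).get? x)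
      = (d.get? x).or ((PySem.List.index? t x).map (fun n => s + (n : Int))) := by
  induction t generalizing s d with
  | nil => simp [PySem.List.enumerate, PySem.List.index?_eq_idxOf?]
  | cons y t ih =>
    simp only [PySem.List.enumerate, List.foldl_cons]
    rw [ih]
    by_cases hx : x = y
    · subst hx
      rw [PySem.List.index?_cons_self]
      by_cases hc : d.contains x
      · rw [if_pos hc]
        have : (d.get? x).isSome := by rw [← PySem.Dict.contains_eq_isSome_get?]; exact hc
        obtain ⟨v, hv⟩ := Option.isSome_iff_exists.mp this
        simp [hv]
      · rw [if_neg hc]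
        have hnone : d.get? x = none := by
          rw [← Option.not_isSome_iff_eq_none, ← PySem.Dict.contains_eq_isSome_get?]
          simpa using hc
        rw [PySem.Dict.get?_insert, if_pos rfl, hnone]
        simp
    · rw [PySem.List.index?_cons_of_ne _ (fun h => hx h.symm)]
      have hstep : (if d.contains y then d else d.insert y s).get? x = d.get? x := by
        by_cases hc : d.contains y
        · rw [if_pos hc]
        · rw [if_neg hc, PySem.Dict.get?_insert, if_neg hx]
      rw [hstep]
      congr 1
      cases h : PySem.List.index? t x
      · simp
      · simp
        omega

lemma buildPos_getD (t : List Int) (x : Int) : (buildPos t).getD x 0 = idxD t x := by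
  rw [PySem.Dict.getD_eq_get?_getD, buildPos, buildPos_go, PySem.Dict.get?_empty, Option.none_or,
    idxD]
  cases h : PySem.List.index? t x <;> simp

def bpred (t : List Int) (p : Int × Int) : Bool :=
  decide ((idxD t p.1 - idxD t p.2).natAbs ≠ 1)
def pairs {α : Type} : List α → List (α × α)
  | [] => []
  | [_] => []
  | a :: b :: r => (a, b) :: pairs (b :: r)
lemma pairs_zip {α : Type} (l : List α) : pairs l = l.zip l.tail := by
  induction l with
  | nil => rfl
  | cons a l ih =>
    cases l with
    | nil => rfl
    | cons b r => simp only [pairs, ih, List.zip_cons_cons, List.tail_cons]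
lemma pairs_length {α : Type} (l : List α) : (pairs l).length = l.length - 1 := by
  rw [pairs_zip]
  cases l with
  | nil => rfl
  | cons a r => simp [List.length_zip]

lemma pairs_eq_map (s : List Int) :
    pairs s = (PySem.List.pyRange 0 ((s.length : Int) - 1) 1).map
      (fun k => (PySem.List.pyGetD s k 0, PySem.List.pyGetD s (k + 1) 0)) := by
  apply List.ext_getElem
  · rw [pairs_length, List.length_map, PySem.List.length_pyRange_one]
    omega
  · intro n h1 h2
    simp only [pairs_zip]
    have hn : n < s.length - 1 := by
      rw [List.length_map, PySem.List.length_pyRange_one] at h2; omega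
    rw [List.getElem_zip, List.getElem_map, PySem.List.getElem_pyRange_one]
    have e1 : PySem.List.pyGetD s (0 + (n : Int)) 0 = s[n]'(by omega) := by
      rw [show ((0 : Int) + (n : Int)) = ((n : Nat) : Int) by omega]
      rw [PySem.List.pyGetD_natCast]
      simp [List.getD_eq_getElem?_getD, List.getElem?_eq_getElem (by omega : n < s.length)]
    have e2 : PySem.List.pyGetD s (0 + (n : Int) + 1) 0 = s[n+1]'(by omega) := by
      rw [show ((0 : Int) + (n : Int) + 1) = (((n+1 : Nat)) : Int) by push_cast; ring]
      rw [PySem.List.pyGetD_natCast]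
      simp [List.getD_eq_getElem?_getD, List.getElem?_eq_getElem (by omega : n+1 < s.length)]
    rw [e1, e2, List.getElem_tail]


lemma fb_eq (s t : List Int) :
    find_breakpoints s t = ((PySem.List.pyRange 0 ((s.length : Int) - 1) 1).filter
      (fun k => bpred t (PySem.List.pyGetD s k 0, PySem.List.pyGetD s (k + 1) 0))).map
        (fun k => k + 1) := by
  unfold find_breakpoints
  rw [PySem.List.foldl_append_ite
      (p := fun index => (idxD t (PySem.List.pyGetD s index 0) -
        idxD t (PySem.List.pyGetD s (index + 1) 0)).natAbs ≠ 1) (f := fun index => index + 1)]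
  simp only [bpred, List.nil_append]

lemma fb_len (s t : List Int) :
    (find_breakpoints s t).length = (pairs s).countP (bpred t) := by
  rw [fb_eq, List.length_map, ← List.countP_eq_length_filter, pairs_eq_map, List.countP_map]
  rfl

lemma fb_mem (s t : List Int) {i : Int} (h : i ∈ find_breakpoints s t) :
    1 ≤ i ∧ i < (s.length : Int) ∧
      bpred t (PySem.List.pyGetD s (i - 1) 0, PySem.List.pyGetD s i 0) = true := by
  rw [fb_eq] at h
  obtain ⟨k, hk, rfl⟩ := List.mem_map.mp h
  obtain ⟨hkr, hkp⟩ := List.mem_filter.mp hk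
  obtain ⟨hk0, hk1⟩ := PySem.List.mem_pyRange_one.mp hkr
  refine ⟨by omega, by omega, ?_⟩
  simpa [show k + 1 - 1 = k by omega] using hkp

lemma fb_pairwise (s t : List Int) : (find_breakpoints s t).Pairwise (· < ·) := by
  rw [fb_eq]
  refine List.Pairwise.map _ (fun a b h => by omega) ?_
  exact List.Pairwise.filter _
    ((PySem.List.pairwise_lt_pyRange_one _ _).imp (fun h => by omega))

lemma pairwise_getElem_lt_of_mem_drop {l : List Int} (hp : l.Pairwise (· < ·)) (k : Nat)
    (hk : k < l.length) {x : Int} (hx : x ∈ l.drop (k + 1)) : l[k] < x := by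
  obtain ⟨m, hm, rfl⟩ := List.getElem_of_mem hx
  rw [List.getElem_drop]
  exact List.pairwise_iff_getElem.mp hp k (k + 1 + m) hk (by rw [List.length_drop] at hm; omega) (by omega)

lemma pairs_append {α : Type} (l1 l2 : List α) (a b : α)
    (ha : l1.getLast? = some a) (hb : l2.head? = some b) :
    pairs (l1 ++ l2) = pairs l1 ++ (a, b) :: pairs l2 := by
  induction l1 with
  | nil => simp at ha
  | cons x l1 ih =>
    cases l1 with
    | nil =>
      cases l2 with
      | nil => simp at hb
      | cons y l2 =>
        simp only [List.getLast?_singleton, Option.some.injEq] at ha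
        simp only [List.head?_cons, Option.some.injEq] at hb
        subst ha hb
        simp [pairs]
    | cons x' l1' =>
      rw [List.getLast?_cons_cons] at ha
      have := ih ha
      simp only [List.cons_append, pairs] at this ⊢
      rw [this]

lemma pairs_reverse {α : Type} (l : List α) :
    pairs l.reverse = (pairs l).reverse.map Prod.swap := by
  induction l with
  | nil => rfl
  | cons x l ih =>
    cases l with
    | nil => rfl
    | cons y r =>
      have ha : (y :: r).reverse.getLast? = some y := by
        rw [List.getLast?_reverse]; rfl
      have hrev : (x :: y :: r).reverse = (y :: r).reverse ++ [x] := by simp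
      rw [hrev, pairs_append _ _ y x ha rfl, ih]
      simp [pairs]

lemma countP_pairs_reverse (t : List Int) (l : List Int) :
    (pairs l.reverse).countP (bpred t) = (pairs l).countP (bpred t) := by
  rw [pairs_reverse, List.countP_map, List.countP_reverse]
  apply List.countP_congr
  rintro ⟨a, b⟩ _
  simp only [Function.comp_apply, Prod.swap_prod_mk, bpred, decide_eq_true_eq]
  omega

lemma countP_pairs_block (t s : List Int) (i' j' : Nat)
    (h1 : 1 ≤ i') (hij : i' < j') (hj : j' < s.length)
    (hbi : bpred t (s.getD (i' - 1) 0, s.getD i' 0) = true)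
    (hbj : bpred t (s.getD (j' - 1) 0, s.getD j' 0) = true) :
    (pairs (s.take i' ++ ((s.drop i').take (j' - i')).reverse ++ s.drop j')).countP (bpred t) + 2
      = (pairs s).countP (bpred t)
        + (if bpred t (s.getD (i' - 1) 0, s.getD (j' - 1) 0) then 1 else 0)
        + (if bpred t (s.getD i' 0, s.getD j' 0) then 1 else 0) := by
  set P := s.take i' with hP
  set M := (s.drop i').take (j' - i') with hM
  set S := s.drop j' with hS
  have hn := hj
  have hG : ∀ k, k < s.length → s[k]? = some (s.getD k 0) := by
    intro k hk
    rw [List.getElem?_eq_getElem hk, List.getD_eq_getElem _ _ hk]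
  have hPlen : P.length = i' := by simp [hP]; omega
  have hMlen : M.length = j' - i' := by simp [hM]; omega
  have hSlen : S.length = s.length - j' := by simp [hS]
  have hPlast : P.getLast? = some (s.getD (i' - 1) 0) := by
    rw [List.getLast?_eq_getElem?, hPlen, hP, List.getElem?_take_of_lt (by omega), hG _ (by omega)]
  have hMhead : M.head? = some (s.getD i' 0) := by
    rw [List.head?_eq_getElem?, hM, List.getElem?_take_of_lt (by omega), List.getElem?_drop,
      Nat.add_zero, hG _ (by omega)]
  have hMlast : M.getLast? = some (s.getD (j' - 1) 0) := by
    rw [List.getLast?_eq_getElem?, hMlen, hM, List.getElem?_take_of_lt (by omega),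
      List.getElem?_drop, show i' + (j' - i' - 1) = j' - 1 by omega, hG _ (by omega)]
  have hShead : S.head? = some (s.getD j' 0) := by
    rw [List.head?_eq_getElem?, hS, List.getElem?_drop, Nat.add_zero, hG _ (by omega)]
  have hMne : M ≠ [] := by
    intro h; rw [h] at hMlen; simp at hMlen; omega
  have hs_eq : s = P ++ (M ++ S) := by
    rw [hP, hM, hS, show s.drop j' = (s.drop i').drop (j' - i') by
      rw [List.drop_drop]; congr 1; omega]
    rw [List.take_append_drop, List.take_append_drop]
  have hMS_head : (M ++ S).head? = some (s.getD i' 0) := by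
    rw [List.head?_append, hMhead, Option.some_or]
  have hMrS_head : (M.reverse ++ S).head? = some (s.getD (j' - 1) 0) := by
    rw [List.head?_append, List.head?_reverse, hMlast, Option.some_or]
  have hMr_last : M.reverse.getLast? = some (s.getD i' 0) := by
    rw [List.getLast?_reverse]; exact hMhead
  have e1 : pairs s = pairs P ++ (s.getD (i' - 1) 0, s.getD i' 0) :: pairs (M ++ S) := by
    conv_lhs => rw [hs_eq]
    exact pairs_append _ _ _ _ hPlast hMS_head
  have e2 : pairs (M ++ S) = pairs M ++ (s.getD (j' - 1) 0, s.getD j' 0) :: pairs S :=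
    pairs_append _ _ _ _ hMlast hShead
  have e3 : pairs (P ++ M.reverse ++ S) = pairs P ++ (s.getD (i' - 1) 0, s.getD (j' - 1) 0) :: pairs (M.reverse ++ S) := by
    rw [List.append_assoc]
    exact pairs_append _ _ _ _ hPlast hMrS_head
  have e4 : pairs (M.reverse ++ S) = pairs M.reverse ++ (s.getD i' 0, s.getD j' 0) :: pairs S :=
    pairs_append _ _ _ _ hMr_last hShead
  rw [e3, e4]
  conv_rhs => rw [e1, e2]
  simp only [List.countP_append, List.countP_cons, countP_pairs_reverse, hbi, hbj, if_true]
  omega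





lemma isBp_eq (t : List Int) (u v : Int) :
    isBp (buildPos t) u v = if bpred t (u, v) = true then 1 else 0 := by
  simp only [isBp, buildPos_getD, bpred]
  by_cases h : (idxD t u - idxD t v).natAbs ≠ 1 <;> simp [h]

lemma cnt_eq (t s : List Int) {i j : Int}
    (hi : i ∈ find_breakpoints s t) (hj : j ∈ find_breakpoints s t) (hij : i < j) :
    ((find_breakpoints (make_reverse s i j) t).length : Int)
      = ((find_breakpoints s t).length : Int) - 2
        + isBp (buildPos t) (PySem.List.pyGetD s (i - 1) 0) (PySem.List.pyGetD s (j - 1) 0)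
        + isBp (buildPos t) (PySem.List.pyGetD s i 0) (PySem.List.pyGetD s j 0) := by
  obtain ⟨hi1, hi2, hbi⟩ := fb_mem s t hi
  obtain ⟨hj1, hj2, hbj⟩ := fb_mem s t hj
  have hmk : make_reverse s i j
      = s.take i.toNat ++ ((s.drop i.toNat).take (j.toNat - i.toNat)).reverse ++ s.drop j.toNat := by
    simp only [make_reverse]
    rw [PySem.List.slice_to s (by omega), PySem.List.slice_toNat s (by omega) (by omega),
      PySem.List.slice_from s (by omega), PySem.List.slice?_none_none_neg_one]
    rfl
  have hget : ∀ k : Int, 0 ≤ k → k < (s.length : Int) →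
      PySem.List.pyGetD s k 0 = s.getD k.toNat 0 := by
    intro k h0 hlt
    rw [PySem.List.pyGetD_of_nonneg _ _ h0]
  have hblock := countP_pairs_block t s i.toNat j.toNat (by omega) (by omega) (by omega)
    (by rw [hget (i - 1) (by omega) (by omega), hget i (by omega) (by omega),
          show (i - 1).toNat = i.toNat - 1 by omega] at hbi; exact hbi)
    (by rw [hget (j - 1) (by omega) (by omega), hget j (by omega) (by omega),
          show (j - 1).toNat = j.toNat - 1 by omega] at hbj; exact hbj)
  rw [hmk, fb_len, fb_len, isBp_eq, isBp_eq]
  rw [hget (i - 1) (by omega) (by omega), hget (j - 1) (by omega) (by omega),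
    hget i (by omega) (by omega), hget j (by omega) (by omega),
    show (i - 1).toNat = i.toNat - 1 by omega, show (j - 1).toNat = j.toNat - 1 by omega]
  have hc : ∀ c : Bool, (if c = true then (1 : Int) else 0) = ((if c = true then (1 : Nat) else 0 : Nat) : Int) := by
    intro c; by_cases h : c = true <;> simp [h]
  rw [hc, hc]
  omega

-- A's running-minimum-with-reset loop, characterised in closed form.
lemma sel_fold_eq {α : Type} (cnt : α → Int) (l : List α) (m : Int) (acc : List α) :
    l.foldl (fun st r =>
        if cnt r < st.1 then (cnt r, [r])
        else if cnt r = st.1 then (st.1, st.2 ++ [r]) else st) (m, acc)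
      = (l.foldl (fun mm r => min mm (cnt r)) m,
         (if l.foldl (fun mm r => min mm (cnt r)) m = m then acc else []) ++
           l.filter (fun r => decide (cnt r = l.foldl (fun mm r => min mm (cnt r)) m))) := by
  induction l generalizing m acc with
  | nil => simp
  | cons r l ih =>
    have hMle : ∀ (m0 : Int), l.foldl (fun mm r => min mm (cnt r)) m0 ≤ m0 := by
      intro m0
      have := (PySem.List.foldl_min_le (l.map cnt) m0).1
      simpa [List.foldl_map] using this
    simp only [List.foldl_cons, List.filter_cons]
    by_cases h1 : cnt r < m
    · rw [if_pos h1, ih]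
      have hmin : min m (cnt r) = cnt r := by omega
      simp only [hmin]
      have hne : l.foldl (fun mm r => min mm (cnt r)) (cnt r) ≠ m := by
        have := hMle (cnt r); omega
      rw [if_neg hne]
      by_cases h2 : cnt r = l.foldl (fun mm r => min mm (cnt r)) (cnt r)
      · rw [if_pos h2.symm, if_pos (decide_eq_true h2)]
        simp
      · rw [if_neg (fun h => h2 h.symm)]
        simp [h2]
    · rw [if_neg h1]
      by_cases h2 : cnt r = m
      · rw [if_pos h2, ih]
        have hmin : min m (cnt r) = m := by omega
        simp only [hmin]
        by_cases h3 : l.foldl (fun mm r => min mm (cnt r)) m = m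
        · rw [if_pos h3, if_pos h3]
          have h4 : cnt r = l.foldl (fun mm r => min mm (cnt r)) m := by omega
          rw [if_pos (decide_eq_true h4)]
          simp
        · rw [if_neg h3, if_neg h3]
          have h4 : ¬ cnt r = l.foldl (fun mm r => min mm (cnt r)) m := by
            have := hMle m; omega
          simp [h4]
      · rw [if_neg h2, ih]
        have hmin : min m (cnt r) = m := by omega
        simp only [hmin]
        have h4 : ¬ cnt r = l.foldl (fun mm r => min mm (cnt r)) m := by
          have := hMle m; omega
        simp [h4]

-- A's selection phase equals B's score-then-filter-by-minimum phase.
lemma sel_vs_filter {α : Type} (cnt : α → Int) (revs : List α) (m : Int) :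
    (revs.foldl (fun st r =>
        if cnt r < st.1 then (cnt r, [r])
        else if cnt r = st.1 then (st.1, st.2 ++ [r]) else st) (m, ([] : List α))).2
      = ((revs.map (fun c => (c, cnt c))).filter (fun p => decide (p.2 =
          (PySem.List.min? ([m] ++ (revs.map (fun c => (c, cnt c))).map (fun p => p.2)) (fun x => x)).getD 0))).map
          (fun p => p.1) := by
  have hm : ([m] ++ (revs.map (fun c => (c, cnt c))).map (fun p : α × Int => p.2))
      = m :: revs.map cnt := by simp [List.map_map]
  rw [hm, PySem.List.min?_id_cons]
  simp only [Option.getD_some, List.foldl_map]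
  rw [sel_fold_eq]
  simp only [ite_self, List.nil_append]
  rw [List.filter_map, List.map_map]
  simp [Function.comp_def]

-- GLUE

-- candidate paired with its true breakpoint count (A's scoring)
def pvF (t : List Int) (c : List Int × (List (Int × Int))) : (List Int × (List (Int × Int))) × Int :=
  (c, ((find_breakpoints c.1 t).length : Int))

lemma flatMap_congr_mem {α β : Type} {l : List α} {f g : α → List β}
    (h : ∀ x ∈ l, f x = g x) : l.flatMap f = l.flatMap g := by
  induction l with
  | nil => rfl
  | cons a l ih =>
    simp only [List.flatMap_cons, h a (List.mem_cons_self), ih (fun x hx => h x (List.mem_cons_of_mem a hx))]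

-- B's breakpoint comprehension equals A's find_breakpoints
lemma bps_alt_eq (t s : List Int) :
    ((PySem.List.pyRange 0 ((s.length : Int) - 1) 1).filter
        (fun k => decide (isBp (buildPos t) (PySem.List.pyGetD s k 0) (PySem.List.pyGetD s (k + 1) 0) = 1))).map (fun k => k + 1)
      = find_breakpoints s t := by
  rw [fb_eq]
  congr 1
  apply List.filter_congr
  intro k _
  rw [isBp_eq]
  by_cases h : bpred t (PySem.List.pyGetD s k 0, PySem.List.pyGetD s (k + 1) 0) = true <;> simp [h]

lemma items_eq (t s : List Int) (hist : List (Int × Int)) :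
    (PySem.List.enumerate (find_breakpoints s t)).flatMap (fun p =>
      (PySem.List.slice (find_breakpoints s t) (some (p.1 + 1)) none).map (fun j =>
        ((make_reverse s p.2 j, hist ++ [(p.2 - 1, j - 1)]),
         ((find_breakpoints s t).length : Int) - 2
           + isBp (buildPos t) (PySem.List.pyGetD s (p.2 - 1) 0) (PySem.List.pyGetD s (j - 1) 0)
           + isBp (buildPos t) (PySem.List.pyGetD s p.2 0) (PySem.List.pyGetD s j 0))))
    = ((PySem.List.pyRange 0 (((find_breakpoints s t).length : Int) - 1) 1).flatMap (fun si =>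
        (PySem.List.pyRange (si + 1) ((find_breakpoints s t).length : Int) 1).map (fun ei =>
          (make_reverse s (PySem.List.pyGetD (find_breakpoints s t) si 0) (PySem.List.pyGetD (find_breakpoints s t) ei 0),
           hist ++ [(PySem.List.pyGetD (find_breakpoints s t) si 0 - 1,
                     PySem.List.pyGetD (find_breakpoints s t) ei 0 - 1)])))).map (pvF t) := by
  set bps := find_breakpoints s t with hbps
  rw [List.map_flatMap, PySem.List.enumerate_eq_map_pyRange bps 0, List.flatMap_map]
  have hlen : PySem.List.len bps = (bps.length : Int) := by simp [PySem.List.len_eq]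
  rw [hlen]
  by_cases hL : bps.length = 0
  · rw [hL]
    norm_num [PySem.List.pyRange_one_eq_nil]
  · have hsplit : PySem.List.pyRange 0 (bps.length : Int) 1
        = PySem.List.pyRange 0 ((bps.length : Int) - 1) 1 ++ [(bps.length : Int) - 1] := by
      have h2 := PySem.List.pyRange_one_succ_right (a := 0) (b := (bps.length : Int) - 1) (by omega)
      rw [sub_add_cancel] at h2
      exact h2
    rw [hsplit, List.flatMap_append]
    have hlast : ([((bps.length : Int) - 1)].flatMap (fun si =>
        (PySem.List.slice bps (some (si + 1)) none).map (fun j =>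
          ((make_reverse s (PySem.List.pyGetD bps si 0) j,
              hist ++ [(PySem.List.pyGetD bps si 0 - 1, j - 1)]),
           (bps.length : Int) - 2
             + isBp (buildPos t) (PySem.List.pyGetD s (PySem.List.pyGetD bps si 0 - 1) 0) (PySem.List.pyGetD s (j - 1) 0)
             + isBp (buildPos t) (PySem.List.pyGetD s (PySem.List.pyGetD bps si 0) 0) (PySem.List.pyGetD s j 0))))) = [] := by
      rw [List.flatMap_cons, List.flatMap_nil, List.append_nil,
        PySem.List.slice_from bps (by omega), show ((bps.length : Int) - 1 + 1).toNat = bps.length by omega,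
        List.drop_length, List.map_nil]
    rw [hlast, List.append_nil]
    apply flatMap_congr_mem
    intro si hsi
    dsimp only
    obtain ⟨hsi0, hsi1⟩ := PySem.List.mem_pyRange_one.mp hsi
    have hsiN : si.toNat < bps.length := by omega
    have hi_get : PySem.List.pyGetD bps si 0 = bps[si.toNat] :=
      PySem.List.pyGetD_eq_getElem bps 0 hsi0 (by omega)
    have hdropmap : (PySem.List.pyRange (si + 1) (bps.length : Int) 1).map
        (fun ei => PySem.List.pyGetD bps ei 0) = bps.drop (si + 1).toNat :=
      PySem.List.map_pyGetD_pyRange' bps 0 (by omega)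
    rw [PySem.List.slice_from bps (by omega)]
    have hrw : List.map (pvF t) ((PySem.List.pyRange (si + 1) (bps.length : Int) 1).map (fun ei =>
          (make_reverse s (PySem.List.pyGetD bps si 0) (PySem.List.pyGetD bps ei 0),
            hist ++ [(PySem.List.pyGetD bps si 0 - 1, PySem.List.pyGetD bps ei 0 - 1)])))
        = (bps.drop (si + 1).toNat).map (fun j =>
            pvF t (make_reverse s (PySem.List.pyGetD bps si 0) j,
              hist ++ [(PySem.List.pyGetD bps si 0 - 1, j - 1)])) := by
      rw [← hdropmap, List.map_map, List.map_map]
      rfl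
    rw [hrw]
    apply List.map_congr_left
    intro j hj
    have hjmem : j ∈ bps := List.mem_of_mem_drop hj
    have himem : PySem.List.pyGetD bps si 0 ∈ bps := by
      rw [hi_get]; exact List.getElem_mem _
    have hij : PySem.List.pyGetD bps si 0 < j := by
      rw [hi_get]
      exact pairwise_getElem_lt_of_mem_drop (hbps ▸ fb_pairwise s t) si.toNat hsiN
        (by rwa [show (si + 1).toNat = si.toNat + 1 by omega] at hj)
    have hcnt := cnt_eq t s (hbps ▸ himem) (hbps ▸ hjmem) hij
    simp only [pvF, ← hbps] at hcnt ⊢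
    rw [hcnt]

lemma step_eq (t : List Int) (sq : List Int × (List (Int × Int)))
    (accA : List (List Int × (List (Int × Int)))) :
    ((PySem.List.enumerate (((PySem.List.pyRange 0 ((sq.1.length : Int) - 1) 1).filter
        (fun k => decide (isBp (buildPos t) (PySem.List.pyGetD sq.1 k 0) (PySem.List.pyGetD sq.1 (k + 1) 0) = 1))).map (fun k => k + 1))).foldl (fun scored p =>
      (PySem.List.slice (((PySem.List.pyRange 0 ((sq.1.length : Int) - 1) 1).filter
        (fun k => decide (isBp (buildPos t) (PySem.List.pyGetD sq.1 k 0) (PySem.List.pyGetD sq.1 (k + 1) 0) = 1))).map (fun k => k + 1)) (some (p.1 + 1)) none).foldl (fun scored j =>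
        scored ++ [((make_reverse sq.1 p.2 j, sq.2 ++ [(p.2 - 1, j - 1)]),
                    ((((PySem.List.pyRange 0 ((sq.1.length : Int) - 1) 1).filter
        (fun k => decide (isBp (buildPos t) (PySem.List.pyGetD sq.1 k 0) (PySem.List.pyGetD sq.1 (k + 1) 0) = 1))).map (fun k => k + 1)).length : Int) - 2
                         + isBp (buildPos t) (PySem.List.pyGetD sq.1 (p.2 - 1) 0) (PySem.List.pyGetD sq.1 (j - 1) 0)
                         + isBp (buildPos t) (PySem.List.pyGetD sq.1 p.2 0) (PySem.List.pyGetD sq.1 j 0))]) scored) (accA.map (pvF t)))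
    = ((PySem.List.pyRange 0 (((find_breakpoints sq.1 t).length : Int) - 1) 1).foldl (fun revs start_index_i =>
        (PySem.List.pyRange (start_index_i + 1) ((find_breakpoints sq.1 t).length : Int) 1).foldl (fun revs end_index_i =>
          revs ++ [(make_reverse sq.1 (PySem.List.pyGetD (find_breakpoints sq.1 t) start_index_i 0) (PySem.List.pyGetD (find_breakpoints sq.1 t) end_index_i 0),
                    sq.2 ++ [(PySem.List.pyGetD (find_breakpoints sq.1 t) start_index_i 0 - 1,
                              PySem.List.pyGetD (find_breakpoints sq.1 t) end_index_i 0 - 1)])]) revs) accA).map (pvF t) := by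
  rw [bps_alt_eq t sq.1]
  simp only [PySem.List.foldl_append_singleton_eq_map, PySem.List.foldl_append_eq_flatMap]
  rw [List.map_append, items_eq t sq.1 sq.2]

-- B's generation fold produces exactly A's candidates paired with their true breakpoint counts.
lemma gen_eq (t : List Int) (sequences : List (List Int × (List (Int × Int)))) :
    (sequences.foldl (fun scored sequence =>
      let bps := ((PySem.List.pyRange 0 ((sequence.1.length : Int) - 1) 1).filter
          (fun k => decide (isBp (buildPos t) (PySem.List.pyGetD sequence.1 k 0) (PySem.List.pyGetD sequence.1 (k + 1) 0) = 1))).map (fun k => k + 1)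
      let base := (bps.length : Int) - 2
      (PySem.List.enumerate bps).foldl (fun scored p =>
        (PySem.List.slice bps (some (p.1 + 1)) none).foldl (fun scored j =>
          scored ++ [((make_reverse sequence.1 p.2 j, sequence.2 ++ [(p.2 - 1, j - 1)]),
                      base + isBp (buildPos t) (PySem.List.pyGetD sequence.1 (p.2 - 1) 0) (PySem.List.pyGetD sequence.1 (j - 1) 0)
                           + isBp (buildPos t) (PySem.List.pyGetD sequence.1 p.2 0) (PySem.List.pyGetD sequence.1 j 0))]) scored) scored) [])
    = (sequences.foldl (fun reversals sequence =>
        let breakpoints := find_breakpoints sequence.1 t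
        (PySem.List.pyRange 0 ((breakpoints.length : Int) - 1) 1).foldl (fun revs start_index_i =>
          (PySem.List.pyRange (start_index_i + 1) (breakpoints.length : Int) 1).foldl (fun revs end_index_i =>
            revs ++ [(make_reverse sequence.1 (PySem.List.pyGetD breakpoints start_index_i 0) (PySem.List.pyGetD breakpoints end_index_i 0),
                      sequence.2 ++ [(PySem.List.pyGetD breakpoints start_index_i 0 - 1,
                                      PySem.List.pyGetD breakpoints end_index_i 0 - 1)])]) revs) reversals) []).map
        (fun c => (c, ((find_breakpoints c.1 t).length : Int))) := by
  have hgen : ∀ (seqs : List (List Int × (List (Int × Int)))) (accA : List (List Int × (List (Int × Int)))),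
      (seqs.foldl (fun scored sequence =>
        let bps := ((PySem.List.pyRange 0 ((sequence.1.length : Int) - 1) 1).filter
            (fun k => decide (isBp (buildPos t) (PySem.List.pyGetD sequence.1 k 0) (PySem.List.pyGetD sequence.1 (k + 1) 0) = 1))).map (fun k => k + 1)
        let base := (bps.length : Int) - 2
        (PySem.List.enumerate bps).foldl (fun scored p =>
          (PySem.List.slice bps (some (p.1 + 1)) none).foldl (fun scored j =>
            scored ++ [((make_reverse sequence.1 p.2 j, sequence.2 ++ [(p.2 - 1, j - 1)]),
                        base + isBp (buildPos t) (PySem.List.pyGetD sequence.1 (p.2 - 1) 0) (PySem.List.pyGetD sequence.1 (j - 1) 0)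
                             + isBp (buildPos t) (PySem.List.pyGetD sequence.1 p.2 0) (PySem.List.pyGetD sequence.1 j 0))]) scored) scored) (accA.map (pvF t)))
      = (seqs.foldl (fun reversals sequence =>
          let breakpoints := find_breakpoints sequence.1 t
          (PySem.List.pyRange 0 ((breakpoints.length : Int) - 1) 1).foldl (fun revs start_index_i =>
            (PySem.List.pyRange (start_index_i + 1) (breakpoints.length : Int) 1).foldl (fun revs end_index_i =>
              revs ++ [(make_reverse sequence.1 (PySem.List.pyGetD breakpoints start_index_i 0) (PySem.List.pyGetD breakpoints end_index_i 0),
                        sequence.2 ++ [(PySem.List.pyGetD breakpoints start_index_i 0 - 1,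
                                        PySem.List.pyGetD breakpoints end_index_i 0 - 1)])]) revs) reversals) accA).map (pvF t) := by
    intro seqs
    induction seqs with
    | nil => intro accA; rfl
    | cons sq tl ih =>
      intro accA
      simp only [List.foldl_cons]
      rw [step_eq t sq accA]
      exact ih _
  have h := hgen sequences []
  simpa only [pvF] using h

lemma main_eq (sequences : List (List Int × (List (Int × Int)))) (target_sequence : List Int) :
    find_min_reverse sequences target_sequence = find_min_reverse_alt sequences target_sequence := by
  simp only [find_min_reverse, find_min_reverse_alt, gen_eq]
  have h := sel_vs_filter
    (fun reversal : List Int × (List (Int × Int)) =>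
      ((find_breakpoints reversal.1 target_sequence).length : Int))
    (List.foldl
      (fun reversals sequence =>
        List.foldl
          (fun revs start_index_i =>
            List.foldl
              (fun revs end_index_i =>
                revs ++
                  [(make_reverse sequence.1
                        (PySem.List.pyGetD (find_breakpoints sequence.1 target_sequence) start_index_i 0)
                        (PySem.List.pyGetD (find_breakpoints sequence.1 target_sequence) end_index_i 0),
                      sequence.2 ++
                        [(PySem.List.pyGetD (find_breakpoints sequence.1 target_sequence) start_index_i 0 - 1,
                            PySem.List.pyGetD (find_breakpoints sequence.1 target_sequence) end_index_i 0 - 1)])])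
              revs (PySem.List.pyRange (start_index_i + 1) ((find_breakpoints sequence.1 target_sequence).length : Int) 1))
          reversals (PySem.List.pyRange 0 (((find_breakpoints sequence.1 target_sequence).length : Int) - 1) 1))
      [] sequences)
    ((target_sequence.length : Int))
  beta_reduce at h
  exact h

-- ===== VERDICT (by name: the statement is the Claim_ definition above) =====
theorem find_min_reverse_spec : Claim_equal_find_min_reverse := by
  intro sequences target_sequence _ _
  unfold Spec_find_min_reverse
  exact main_eq sequences target_sequence
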